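-- pv_equiv track=rewrite | github.com/rsirefelt/advent_of_code | dec2/mans_larsson/main.py | contains23
-- ===== SOURCE A (Python) =====
-- def contains23(line):
--     dd = {}
--     for i in range(len(line)-1):
--         if line[i] in dd:
--             dd[line[i]] += 1
--         else:
--             dd[line[i]] = 1
--     a=0
--     b=0
--     for k,v in dd.items():
--         if v == 2:
--             a = 1
--         if v == 3:
--             b = 1
--     return a,b
-- ===== SOURCE B (Python) =====
-- def contains23(line):
--     a = 0
--     b = 0
--     run = 0
--     prev = None
--     for c in sorted(line[:-1]):
--         if c == prev:
--             run += 1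
--         else:
--             if run == 2:
--                 a = 1
--             if run == 3:
--                 b = 1
--             prev = c
--             run = 1
--     if run == 2:
--         a = 1
--     if run == 3:
--         b = 1
--     return a, b
-- ===== Notes on version B (the rewrite author's own statement) =====
-- stated objective: alternative
-- what changed: Replaces A's dict-of-counts (hash counting pass plus a scan over dict items) by sorting the characters of line[:-1] and detecting runs of length exactly 2 or 3 in a single pass over the sorted sequence.
import Mathlib
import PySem

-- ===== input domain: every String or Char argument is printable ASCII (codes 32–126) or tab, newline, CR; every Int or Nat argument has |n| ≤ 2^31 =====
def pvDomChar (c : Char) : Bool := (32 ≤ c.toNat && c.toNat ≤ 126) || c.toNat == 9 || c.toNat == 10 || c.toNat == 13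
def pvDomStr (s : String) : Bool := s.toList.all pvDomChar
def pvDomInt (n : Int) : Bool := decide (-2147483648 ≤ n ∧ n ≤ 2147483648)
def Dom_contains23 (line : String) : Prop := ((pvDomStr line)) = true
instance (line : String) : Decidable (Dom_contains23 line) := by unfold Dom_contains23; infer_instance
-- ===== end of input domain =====

-- B replaces A's dict-of-counts (count pass + scan over dict items) by sorting line[:-1] and
-- flagging runs of length exactly 2 / 3 in a single pass (alternative algorithm, same return value).

-- ===== PORT A =====
-- loop body of A's first loop: 'if line[i] in dd: dd[line[i]] += 1 else: dd[line[i]] = 1'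
def pvCount (d : PySem.Dict Char Int) (c : Char) : PySem.Dict Char Int :=
  if d.contains c then d.modify c 0 (· + 1) else d.insert c 1

def contains23 (line : String) : Int × Int :=
  (((PySem.List.pyRange 0 ((line.toList.length : Int) - 1) 1).foldl
      (fun d i => pvCount d (PySem.List.pyGetD line.toList i ' '))
      PySem.Dict.empty).items).foldl
    (fun ab kv => ((if kv.2 = 2 then (1 : Int) else ab.1), (if kv.2 = 3 then (1 : Int) else ab.2)))
    (0, 0)

-- ===== PORT B =====
-- loop body of Source B's single pass over sorted(line[:-1]): state (a, b, run, prev)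
def pvStep (st : Int × Int × Int × Option Char) (c : Char) : Int × Int × Int × Option Char :=
  match st with
  | (a, b, run, prev) =>
    if some c = prev then (a, b, run + 1, prev)
    else ((if run = 2 then 1 else a), (if run = 3 then 1 else b), 1, some c)

-- the trailing 'if run == 2: a = 1 / if run == 3: b = 1' after Source B's loop
def pvFin (st : Int × Int × Int × Option Char) : Int × Int :=
  match st with
  | (a, b, run, _) => ((if run = 2 then 1 else a), (if run = 3 then 1 else b))

def contains23_alt (line : String) : Int × Int :=
  pvFin ((PySem.List.sorted (PySem.List.slice line.toList none (some (-1))) (fun c => c) false).foldl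
    pvStep (0, 0, 0, none))

-- ===== PRECONDITION & SPEC =====
def Spec_contains23 (line : String) (out : Int × Int) : Prop := out = contains23_alt line
instance (line : String) (out : Int × Int) : Decidable (Spec_contains23 line out) := by unfold Spec_contains23; infer_instance

-- ===== CLAIM (what is proved, stated in full; the proofs are below) =====
def Claim_equal_contains23 : Prop := ∀ (line : String), Dom_contains23 line → Spec_contains23 line (contains23 line)

-- ===== LEMMAS AND PROOFS =====
-- canonical value both programs compute: 1 iff some char occurs exactly k times in s, else 0
def pvFlag (k : Nat) (s : List Char) : Int := if ∃ c, c ∈ s ∧ s.count c = k then 1 else 0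

theorem pv_ite_collapse (P Q : Prop) [Decidable P] [Decidable Q] (a : Int) :
    (if P then (1:Int) else if Q then 1 else a) = if P ∨ Q then 1 else a := by
  split_ifs <;> tauto

-- A's second loop sets each flag iff some dict value equals 2 (resp. 3)
theorem pv_items_fold (l : List (Char × Int)) (a b : Int) :
    l.foldl (fun ab kv => ((if kv.2 = 2 then (1 : Int) else ab.1), (if kv.2 = 3 then (1 : Int) else ab.2))) (a, b)
      = ((if ∃ kv ∈ l, kv.2 = 2 then 1 else a), (if ∃ kv ∈ l, kv.2 = 3 then 1 else b)) := by
  induction l generalizing a b with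
  | nil => simp
  | cons x t ih =>
    have h2 : (∃ kv ∈ x :: t, kv.2 = (2:Int)) ↔ ((∃ kv ∈ t, kv.2 = 2) ∨ x.2 = 2) := by
      simp [List.mem_cons]; tauto
    have h3 : (∃ kv ∈ x :: t, kv.2 = (3:Int)) ↔ ((∃ kv ∈ t, kv.2 = 3) ∨ x.2 = 3) := by
      simp [List.mem_cons]; tauto
    rw [List.foldl_cons, ih, if_congr h2 rfl rfl, if_congr h3 rfl rfl,
      ← pv_ite_collapse, ← pv_ite_collapse]

theorem pv_flag_of_counter (s : List Char) (k : Nat) (ki : Int) (hk : ki = (k : Int)) :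
    (if ∃ kv ∈ (PySem.Set.ofList s).map (fun c => (c, (s.count c : Int))), kv.2 = ki then (1:Int) else 0) = pvFlag k s := by
  subst hk
  unfold pvFlag
  congr 1
  simp only [List.mem_map, eq_iff_iff]
  constructor
  · rintro ⟨kv, ⟨c, hc, rfl⟩, h⟩
    have h' : (s.count c : Int) = (k : Int) := h
    exact ⟨c, (PySem.Set.mem_ofList _ _).mp hc, by exact_mod_cast h'⟩
  · rintro ⟨c, hc, h⟩
    exact ⟨(c, (s.count c : Int)), ⟨c, (PySem.Set.mem_ofList _ _).mpr hc, rfl⟩,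
      show (s.count c : Int) = (k : Int) by exact_mod_cast h⟩

theorem pv_range_len_pred (cs : List Char) :
    PySem.List.pyRange 0 ((cs.length : Int) - 1) 1 = PySem.List.pyRange 0 ((cs.dropLast.length : Int)) 1 := by
  cases cs with
  | nil =>
    rw [PySem.List.pyRange_one_eq_nil (by norm_num), PySem.List.pyRange_one_eq_nil (by norm_num)]
  | cons x t =>
    congr 1
    simp

theorem pvCount_eq_modify (d : PySem.Dict Char Int) (c : Char) : pvCount d c = d.modify c 0 (· + 1) := by
  unfold pvCount
  by_cases h : d.contains c
  · rw [if_pos h]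
  · rw [if_neg h]
    show d.insert c 1 = d.insert c ((d.getD c 0) + 1)
    rw [PySem.Dict.getD_of_not_contains (h := by simpa using h)]
    norm_num

theorem pv_dict_eq_counter (line : String) :
    (PySem.List.pyRange 0 ((line.toList.length : Int) - 1) 1).foldl
      (fun d i => pvCount d (PySem.List.pyGetD line.toList i ' '))
      PySem.Dict.empty = PySem.Dict.counter line.toList.dropLast := by
  rw [pv_range_len_pred]
  have hcong : ∀ (acc : PySem.Dict Char Int) (i : Int), i ∈ PySem.List.pyRange 0 ((line.toList.dropLast.length : Int)) 1 →
      pvCount acc (PySem.List.pyGetD line.toList i ' ')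
      = pvCount acc (PySem.List.pyGetD line.toList.dropLast i ' ') := by
    intro acc i hi
    rw [PySem.List.mem_pyRange_one] at hi
    have hlt : i < (line.toList.dropLast.length : Int) := hi.2
    have hlt' : i < (line.toList.length : Int) := by
      simp only [List.length_dropLast] at hlt ⊢
      omega
    rw [PySem.List.pyGetD_eq_getElem line.toList ' ' hi.1 hlt',
      PySem.List.pyGetD_eq_getElem line.toList.dropLast ' ' hi.1 hlt,
      List.getElem_dropLast]
  rw [PySem.List.foldl_congr_mem _ _ _ _ hcong,
    PySem.List.foldl_pyRange_zero_pyGetD' line.toList.dropLast ' ' pvCount PySem.Dict.empty,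
    PySem.Dict.counter_eq_foldl]
  exact PySem.List.foldl_congr_mem _ _ _ _ (fun d c _ => pvCount_eq_modify d c)

theorem contains23_eq_flags (line : String) :
    contains23 line = (pvFlag 2 line.toList.dropLast, pvFlag 3 line.toList.dropLast) := by
  unfold contains23
  rw [pv_dict_eq_counter line, PySem.Dict.items_counter, pv_items_fold]
  rw [pv_flag_of_counter line.toList.dropLast 2 2 (by norm_num),
    pv_flag_of_counter line.toList.dropLast 3 3 (by norm_num)]

-- condition under which Source B's scan, started with run count 'run' of current char c, ends with flag k set
abbrev pvCond (m : Int) (run : Int) (c : Char) (t : List Char) : Prop :=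
  run + (t.count c : Int) = m ∨ ∃ x ∈ t, x ≠ c ∧ (t.count x : Int) = m

theorem pv_cond_head (m run : Int) (c : Char) (t : List Char) :
    pvCond m (run + 1) c t ↔ pvCond m run c (c :: t) := by
  unfold pvCond
  constructor
  · rintro (h | ⟨y, hy, hyc, hk⟩)
    · left; rw [List.count_cons_self]; push_cast; omega
    · right; exact ⟨y, List.mem_cons_of_mem _ hy, hyc, by rwa [List.count_cons_of_ne hyc.symm]⟩
  · rintro (h | ⟨y, hy, hyc, hk⟩)
    · left; rw [List.count_cons_self] at h; push_cast at h ⊢; omega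
    · right
      rcases List.mem_cons.mp hy with rfl | hy'
      · exact absurd rfl hyc
      · exact ⟨y, hy', hyc, by rwa [List.count_cons_of_ne hyc.symm] at hk⟩

theorem pv_cond_step (m run : Int) (c x : Char) (t : List Char)
    (hcx : c < x) (hxt : ∀ y ∈ t, x ≤ y) :
    (pvCond m 1 x t ∨ run = m) ↔ pvCond m run c (x :: t) := by
  have hcnot : c ∉ x :: t := by
    intro h
    rcases List.mem_cons.mp h with rfl | h'
    · exact absurd rfl hcx.ne
    · exact absurd (hxt c h') (not_le.mpr hcx)
  have hc0 : (x :: t).count c = 0 := List.count_eq_zero_of_not_mem hcnot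
  unfold pvCond
  rw [hc0]
  constructor
  · rintro ((h | ⟨y, hy, hyx, hk⟩) | h)
    · right
      refine ⟨x, List.mem_cons_self, hcx.ne', ?_⟩
      rw [List.count_cons_self]; push_cast at h ⊢; omega
    · right
      have hyc : y ≠ c := fun h => absurd (hxt y hy) (by subst h; exact not_le.mpr hcx)
      exact ⟨y, List.mem_cons_of_mem _ hy, hyc, by rwa [List.count_cons_of_ne hyx.symm]⟩
    · left; push_cast; omega
  · rintro (h | ⟨y, hy, hyc, hk⟩)
    · right; push_cast at h; omega
    · left
      rcases List.mem_cons.mp hy with rfl | hy'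
      · left; rw [List.count_cons_self] at hk; push_cast at hk ⊢; omega
      · by_cases hyx : y = x
        · subst hyx
          left; rw [List.count_cons_self] at hk; push_cast at hk ⊢; omega
        · right; exact ⟨y, hy', hyx, by rwa [List.count_cons_of_ne (Ne.symm hyx)] at hk⟩

theorem pv_scan_spec (t : List Char) (hs : t.Pairwise (· ≤ ·)) (c : Char)
    (hc : ∀ x ∈ t, c ≤ x) (a b run : Int) :
    pvFin (t.foldl pvStep (a, b, run, some c)) =
      ((if pvCond 2 run c t then 1 else a), (if pvCond 3 run c t then 1 else b)) := by
  induction t generalizing c a b run with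
  | nil =>
    simp [pvFin, pvCond]
  | cons x t ih =>
    rw [List.foldl_cons]
    by_cases hx : x = c
    · subst hx
      rw [show pvStep (a, b, run, some x) x = (a, b, run + 1, some x) by simp [pvStep]]
      rw [ih hs.of_cons x (fun y hy => List.rel_of_pairwise_cons hs hy) a b (run + 1)]
      rw [if_congr (pv_cond_head 2 run x t) rfl rfl, if_congr (pv_cond_head 3 run x t) rfl rfl]
    · have hcx : c < x := lt_of_le_of_ne (hc x List.mem_cons_self) (fun h => hx h.symm)
      rw [show pvStep (a, b, run, some c) x
          = ((if run = 2 then 1 else a), (if run = 3 then 1 else b), 1, some x) by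
        simp [pvStep, hx]]
      rw [ih hs.of_cons x (fun y hy => List.rel_of_pairwise_cons hs hy) _ _ 1]
      rw [pv_ite_collapse, pv_ite_collapse,
        if_congr (pv_cond_step 2 run c x t hcx (fun y hy => List.rel_of_pairwise_cons hs hy)) rfl rfl,
        if_congr (pv_cond_step 3 run c x t hcx (fun y hy => List.rel_of_pairwise_cons hs hy)) rfl rfl]

theorem pv_cond_top (m : Int) (x : Char) (t : List Char) :
    pvCond m 1 x t ↔ ∃ y ∈ x :: t, ((x :: t).count y : Int) = m := by
  unfold pvCond
  constructor
  · rintro (h | ⟨y, hy, hyx, hk⟩)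
    · exact ⟨x, List.mem_cons_self, by rw [List.count_cons_self]; push_cast at h ⊢; omega⟩
    · exact ⟨y, List.mem_cons_of_mem _ hy, by rwa [List.count_cons_of_ne hyx.symm]⟩
  · rintro ⟨y, hy, hk⟩
    rcases List.mem_cons.mp hy with rfl | hy'
    · left; rw [List.count_cons_self] at hk; push_cast at hk ⊢; omega
    · by_cases hyx : y = x
      · subst hyx; left; rw [List.count_cons_self] at hk; push_cast at hk ⊢; omega
      · right; exact ⟨y, hy', hyx, by rwa [List.count_cons_of_ne (Ne.symm hyx)] at hk⟩

theorem contains23_alt_eq_flags (line : String) :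
    contains23_alt line = (pvFlag 2 line.toList.dropLast, pvFlag 3 line.toList.dropLast) := by
  unfold contains23_alt
  rw [PySem.List.slice_to_neg_one]
  have hperm : (PySem.List.sorted line.toList.dropLast (fun c => c) false).Perm line.toList.dropLast :=
    PySem.List.sorted_perm _ _ _
  have hpw : (PySem.List.sorted line.toList.dropLast (fun c => c) false).Pairwise (· ≤ ·) :=
    PySem.List.sorted_pairwise _ _
  cases ht : PySem.List.sorted line.toList.dropLast (fun c => c) false with
  | nil =>
    have hs : line.toList.dropLast = [] := (ht ▸ hperm).symm.eq_nil
    simp [pvFin, pvFlag, hs]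
  | cons x t =>
    rw [ht] at hperm hpw
    rw [List.foldl_cons]
    rw [show pvStep (0, 0, 0, none) x = ((0:Int), (0:Int), (1:Int), some x) by simp [pvStep]]
    rw [pv_scan_spec t hpw.of_cons x (fun y hy => List.rel_of_pairwise_cons hpw hy) 0 0 1]
    have key : ∀ (m : Int) (k : Nat), m = (k : Int) →
        (pvCond m 1 x t ↔ ∃ c, c ∈ line.toList.dropLast ∧ line.toList.dropLast.count c = k) := by
      rintro m k rfl
      rw [pv_cond_top]
      constructor
      · rintro ⟨y, hy, hk⟩
        exact ⟨y, hperm.mem_iff.mp hy, by rw [← hperm.count_eq]; exact_mod_cast hk⟩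
      · rintro ⟨c, hc, hk⟩
        exact ⟨c, hperm.mem_iff.mpr hc, by rw [hperm.count_eq]; exact_mod_cast hk⟩
    unfold pvFlag
    rw [if_congr (key 2 2 (by norm_num)) rfl rfl, if_congr (key 3 3 (by norm_num)) rfl rfl]

-- ===== VERDICT (by name: the statement is the Claim_ definition above) =====
theorem contains23_spec : Claim_equal_contains23 := by
  intro line _
  unfold Spec_contains23
  rw [contains23_eq_flags, contains23_alt_eq_flags]
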